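-- pv_equiv track=rewrite | github.com/ConflictHQ/fossilrepo | fossil/views.py | _compute_split_lines
-- ===== SOURCE A (Python) =====
-- def _compute_split_lines(diff_lines):
--     """Convert unified diff lines into parallel left/right arrays for split view.
--
--     Context lines appear on both sides.  Deletions appear only on the left with
--     an empty placeholder on the right.  Additions appear only on the right with
--     an empty placeholder on the left.  Adjacent del+add runs are paired row-by-row
--     so moves read naturally.
--     """
--     left = []
--     right = []
--
--     # Collect runs of consecutive del/add lines so we can pair them
--     i = 0
--     while i < len(diff_lines):
--         dl = diff_lines[i]
--         if dl["type"] in ("header", "hunk"):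
--             left.append(dl)
--             right.append(dl)
--             i += 1
--             continue
--
--         if dl["type"] == "del":
--             # Gather contiguous del block, then contiguous add block
--             dels = []
--             while i < len(diff_lines) and diff_lines[i]["type"] == "del":
--                 dels.append(diff_lines[i])
--                 i += 1
--             adds = []
--             while i < len(diff_lines) and diff_lines[i]["type"] == "add":
--                 adds.append(diff_lines[i])
--                 i += 1
--             max_len = max(len(dels), len(adds))
--             for j in range(max_len):
--                 left.append(dels[j] if j < len(dels) else {"text": "", "type": "empty", "old_num": "", "new_num": ""})
--                 right.append(adds[j] if j < len(adds) else {"text": "", "type": "empty", "old_num": "", "new_num": ""})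
--             continue
--
--         if dl["type"] == "add":
--             # Orphan add with no preceding del
--             left.append({"text": "", "type": "empty", "old_num": "", "new_num": ""})
--             right.append(dl)
--             i += 1
--             continue
--
--         # Context line
--         left.append(dl)
--         right.append(dl)
--         i += 1
--
--     return left, right
-- ===== SOURCE B (Python) =====
-- def _compute_split_lines(diff_lines):
--     """Single forward pass with pending del/add buffers and a flush that
--     pads the shorter buffer and emits both sides."""
--     left = []
--     right = []
--     dels = []
--     adds = []
--
--     def blank():
--         return {"text": "", "type": "empty", "old_num": "", "new_num": ""}
--
--     def flush():
--         n = max(len(dels), len(adds))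
--         left.extend(dels + [blank() for _ in range(n - len(dels))])
--         right.extend(adds + [blank() for _ in range(n - len(adds))])
--         dels.clear()
--         adds.clear()
--
--     for dl in diff_lines:
--         t = dl["type"]
--         if t == "del":
--             if adds:
--                 flush()
--             dels.append(dl)
--         elif t == "add":
--             if dels:
--                 adds.append(dl)
--             else:
--                 left.append(blank())
--                 right.append(dl)
--         else:
--             flush()
--             left.append(dl)
--             right.append(dl)
--     flush()
--     return left, right
-- ===== Notes on version B (the rewrite author's own statement) =====
-- stated objective: alternative
-- what changed: Replaced A's index-driven while loop with nested run-gathering inner loops and range-indexed pairing by a single forward for-pass that maintains pending del/add buffers and a flush() that pads the shorter buffer and emits both sides.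
import Mathlib
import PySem

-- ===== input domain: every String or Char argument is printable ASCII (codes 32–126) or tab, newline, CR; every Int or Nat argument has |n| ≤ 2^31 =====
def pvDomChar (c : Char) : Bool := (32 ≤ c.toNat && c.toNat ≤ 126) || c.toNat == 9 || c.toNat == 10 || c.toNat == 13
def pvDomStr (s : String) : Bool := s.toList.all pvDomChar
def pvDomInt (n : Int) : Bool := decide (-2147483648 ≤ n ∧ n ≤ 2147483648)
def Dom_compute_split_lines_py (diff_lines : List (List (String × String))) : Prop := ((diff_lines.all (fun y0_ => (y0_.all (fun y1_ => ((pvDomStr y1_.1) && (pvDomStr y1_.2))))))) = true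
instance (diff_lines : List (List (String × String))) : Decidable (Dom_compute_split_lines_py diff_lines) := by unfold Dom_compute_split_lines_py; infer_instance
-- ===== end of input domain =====

-- B replaces A's index-driven while loop (nested run-gathering inner loops + range-indexed
-- pairing) by a single forward pass with pending del/add buffers and a padding flush;
-- same cost, different decomposition. A raises KeyError when a line lacks "type": Pre_ excludes that.


-- ===== PORT A =====
-- dl["type"]: first match in the association list; total form (Pre_ guarantees the key exists)
def pvTyp (dl : List (String × String)) : String := (List.lookup "type" dl).getD ""

def pvEmptyLine : List (String × String) :=
  [("text", ""), ("type", "empty"), ("old_num", ""), ("new_num", "")]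

-- the inner `while … diff_lines[i]["type"] == t: …; i += 1` gathering loops of A
def pvTake (t : String) : List (List (String × String)) →
    List (List (String × String)) × List (List (String × String))
  | [] => ([], [])
  | dl :: rest =>
    if pvTyp dl == t then
      let p := pvTake t rest
      (dl :: p.1, p.2)
    else ([], dl :: rest)

theorem pvTake_len (t : String) : ∀ l, (pvTake t l).2.length ≤ l.length := by
  intro l
  induction l with
  | nil => simp [pvTake]
  | cons dl rest ih =>
    simp only [pvTake]
    split
    · exact Nat.le_succ_of_le ih
    · simp

-- A's `for j in range(max_len): left.append(dels[j] if j < len(dels) else empty); right.append(…)`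
def pvPair (dels adds : List (List (String × String))) :
    List (List (String × String)) × List (List (String × String)) :=
  ((List.range (max dels.length adds.length)).foldl (fun acc j => acc ++ [dels.getD j pvEmptyLine]) [],
   (List.range (max dels.length adds.length)).foldl (fun acc j => acc ++ [adds.getD j pvEmptyLine]) [])

-- A's outer while loop over the index i, as recursion on the remaining suffix
def pvLoopA : List (List (String × String)) →
    List (List (String × String)) × List (List (String × String))
  | [] => ([], [])
  | dl :: rest =>
    let t := pvTyp dl
    if t == "header" || t == "hunk" then
      let p := pvLoopA rest
      (dl :: p.1, dl :: p.2)
    else if t == "del" then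
      -- the first iteration of A's del-gathering loop consumes dl itself
      let d := pvTake "del" rest
      let a := pvTake "add" d.2
      let pr := pvPair (dl :: d.1) a.1
      let p := pvLoopA a.2
      (pr.1 ++ p.1, pr.2 ++ p.2)
    else if t == "add" then
      let p := pvLoopA rest
      (pvEmptyLine :: p.1, dl :: p.2)
    else
      let p := pvLoopA rest
      (dl :: p.1, dl :: p.2)
termination_by l => l.length
decreasing_by
  all_goals
    have h1 := pvTake_len "add" (pvTake "del" rest).2
  all_goals
    have h2 := pvTake_len "del" rest
  all_goals simp
  all_goals omega

def compute_split_lines_py (diff_lines : List (List (String × String))) :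
    (List (List (String × String))) × (List (List (String × String))) :=
  pvLoopA diff_lines

-- ===== PORT B =====
structure PvSt where
  left : List (List (String × String))
  right : List (List (String × String))
  dels : List (List (String × String))
  adds : List (List (String × String))
deriving Repr, DecidableEq

-- Source B's flush(): pad the shorter buffer with blanks, emit both sides, clear
def pvFlush (st : PvSt) : PvSt :=
  let n := max st.dels.length st.adds.length
  ⟨st.left ++ (st.dels ++ List.replicate (n - st.dels.length) pvEmptyLine),
   st.right ++ (st.adds ++ List.replicate (n - st.adds.length) pvEmptyLine),
   [], []⟩

def pvStepB (st : PvSt) (dl : List (String × String)) : PvSt :=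
  let t := pvTyp dl
  if t == "del" then
    let st1 := if st.adds.isEmpty then st else pvFlush st
    ⟨st1.left, st1.right, st1.dels ++ [dl], st1.adds⟩
  else if t == "add" then
    if st.dels.isEmpty then
      ⟨st.left ++ [pvEmptyLine], st.right ++ [dl], st.dels, st.adds⟩
    else
      ⟨st.left, st.right, st.dels, st.adds ++ [dl]⟩
  else
    let st1 := pvFlush st
    ⟨st1.left ++ [dl], st1.right ++ [dl], st1.dels, st1.adds⟩

def compute_split_lines_py_alt (diff_lines : List (List (String × String))) :
    (List (List (String × String))) × (List (List (String × String))) :=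
  let st := pvFlush (diff_lines.foldl pvStepB ⟨[], [], [], []⟩)
  (st.left, st.right)

-- ===== PRECONDITION & SPEC =====
-- Pre_ excludes exactly the inputs where some line has no "type" key, on which Python A raises KeyError.
def Pre_compute_split_lines_py (diff_lines : List (List (String × String))) : Prop :=
  ∀ dl ∈ diff_lines, (List.lookup "type" dl).isSome = true
instance (diff_lines : List (List (String × String))) : Decidable (Pre_compute_split_lines_py diff_lines) := by unfold Pre_compute_split_lines_py; infer_instance

def pvWitness_compute_split_lines_py : (List (List (String × String))) :=
  [[("type", "header"), ("text", "--- a")],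
   [("type", "del"), ("text", "x"), ("old_num", "1")],
   [("type", "add"), ("text", "y"), ("new_num", "1")],
   [("type", "context"), ("text", "z")]]

def Spec_compute_split_lines_py (diff_lines : List (List (String × String))) (out : (List (List (String × String))) × (List (List (String × String)))) : Prop := out = compute_split_lines_py_alt diff_lines
instance (diff_lines : List (List (String × String))) (out : (List (List (String × String))) × (List (List (String × String)))) : Decidable (Spec_compute_split_lines_py diff_lines out) := by unfold Spec_compute_split_lines_py; infer_instance

-- ===== CLAIM (what is proved, stated in full; the proofs are below) =====
def Claim_equal_compute_split_lines_py : Prop := ∀ (diff_lines : List (List (String × String))), Dom_compute_split_lines_py diff_lines → Pre_compute_split_lines_py diff_lines → Spec_compute_split_lines_py diff_lines (compute_split_lines_py diff_lines)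

-- ===== LEMMAS AND PROOFS =====

theorem pv_foldl_append {α β : Type} (f : β → α) :
    ∀ (l : List β) (acc : List α),
      l.foldl (fun acc j => acc ++ [f j]) acc = acc ++ l.map f := by
  intro l
  induction l with
  | nil => simp
  | cons x xs ih => intro acc; simp [List.foldl_cons, ih]

theorem pv_map_getD {α : Type} (e : α) :
    ∀ (d : List α) (k : Nat),
      (List.range (d.length + k)).map (fun j => d.getD j e) = d ++ List.replicate k e := by
  intro d
  induction d with
  | nil =>
    intro k
    simp only [List.length_nil, Nat.zero_add, List.nil_append]
    induction k with
    | zero => simp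
    | succ m ih => simp [List.range_succ, ih, List.replicate_succ']
  | cons x d' ih =>
    intro k
    have hlen : (x :: d').length + k = (d'.length + k) + 1 := by simp; omega
    rw [hlen, List.range_succ_eq_map]
    simp only [List.map_cons, List.map_map]
    have : ((List.range (d'.length + k)).map ((fun j => (x :: d').getD j e) ∘ Nat.succ))
        = (List.range (d'.length + k)).map (fun j => d'.getD j e) := by
      apply List.map_congr_left; intro j _; simp [List.getD]
    rw [this, ih]
    simp [List.getD]

theorem pvPair_eq_pad (d a : List (List (String × String))) :
    pvPair d a =
      (d ++ List.replicate (max d.length a.length - d.length) pvEmptyLine,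
       a ++ List.replicate (max d.length a.length - a.length) pvEmptyLine) := by
  unfold pvPair
  rw [pv_foldl_append, pv_foldl_append]
  have hd : max d.length a.length = d.length + (max d.length a.length - d.length) := by omega
  have ha : max d.length a.length = a.length + (max d.length a.length - a.length) := by omega
  have h1 : (List.range (max d.length a.length)).map (fun j => d.getD j pvEmptyLine)
      = d ++ List.replicate (max d.length a.length - d.length) pvEmptyLine := by
    conv_lhs => rw [hd]
    exact pv_map_getD pvEmptyLine d _
  have h2 : (List.range (max d.length a.length)).map (fun j => a.getD j pvEmptyLine)
      = a ++ List.replicate (max d.length a.length - a.length) pvEmptyLine := by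
    conv_lhs => rw [ha]
    exact pv_map_getD pvEmptyLine a _
  rw [h1, h2]
  simp

def pvFinish (st : PvSt) :
    List (List (String × String)) × List (List (String × String)) :=
  ((pvFlush st).left, (pvFlush st).right)

theorem pvFlush_state (l r d a : List (List (String × String))) :
    pvFlush ⟨l, r, d, a⟩ = ⟨l ++ (pvPair d a).1, r ++ (pvPair d a).2, [], []⟩ := by
  rw [pvPair_eq_pad]; rfl

theorem pvFlush_empty (l r : List (List (String × String))) :
    pvFlush ⟨l, r, [], []⟩ = ⟨l, r, [], []⟩ := by
  simp [pvFlush]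

theorem pvFinish_state (l r d a : List (List (String × String))) :
    pvFinish ⟨l, r, d, a⟩ = (l ++ (pvPair d a).1, r ++ (pvPair d a).2) := by
  rw [pvFinish, pvFlush_state]

theorem pvPair_nil_nil : pvPair [] [] = ([], []) := by
  simp [pvPair]

-- the combined loop invariant: B's fold from (l, r, [], []), (l, r, d, []) and (l, r, d, a)
-- computes A's result for the remaining suffix, appended to l / r
theorem pv_main (rest : List (List (String × String))) :
    (∀ l r, pvFinish (rest.foldl pvStepB ⟨l, r, [], []⟩) =
      (l ++ (pvLoopA rest).1, r ++ (pvLoopA rest).2)) ∧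
    (∀ l r d, d ≠ [] → pvFinish (rest.foldl pvStepB ⟨l, r, d, []⟩) =
      (l ++ (pvPair (d ++ (pvTake "del" rest).1) (pvTake "add" (pvTake "del" rest).2).1).1
         ++ (pvLoopA (pvTake "add" (pvTake "del" rest).2).2).1,
       r ++ (pvPair (d ++ (pvTake "del" rest).1) (pvTake "add" (pvTake "del" rest).2).1).2
         ++ (pvLoopA (pvTake "add" (pvTake "del" rest).2).2).2)) ∧
    (∀ l r d a, d ≠ [] → a ≠ [] → pvFinish (rest.foldl pvStepB ⟨l, r, d, a⟩) =
      (l ++ (pvPair d (a ++ (pvTake "add" rest).1)).1 ++ (pvLoopA (pvTake "add" rest).2).1,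
       r ++ (pvPair d (a ++ (pvTake "add" rest).1)).2 ++ (pvLoopA (pvTake "add" rest).2).2)) := by
  induction rest with
  | nil =>
    refine ⟨?_, ?_, ?_⟩
    · intro l r
      rw [List.foldl_nil, pvFinish_state, pvPair_nil_nil, pvLoopA]
    · intro l r d _
      rw [List.foldl_nil, pvFinish_state]
      simp [pvTake, pvLoopA]
    · intro l r d a _ _
      rw [List.foldl_nil, pvFinish_state]
      simp [pvTake, pvLoopA]
  | cons dl rest ih =>
    obtain ⟨ihm, ihd, iha⟩ := ih
    refine ⟨?_, ?_, ?_⟩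
    · -- buffers empty
      intro l r
      by_cases hd : (pvTyp dl == "del") = true
      · have hnh : (pvTyp dl == "header" || pvTyp dl == "hunk") = false := by simp_all
        rw [pvLoopA]
        simp only [List.foldl_cons, pvStepB, hd, hnh, if_true, List.isEmpty_nil,
          Bool.false_eq_true, if_false, List.nil_append]
        rw [ihd l r [dl] (by simp)]
        simp
      · by_cases ha : (pvTyp dl == "add") = true
        · have hnh : (pvTyp dl == "header" || pvTyp dl == "hunk") = false := by simp_all
          rw [pvLoopA]
          simp only [List.foldl_cons, pvStepB, hd, ha, hnh, if_true, List.isEmpty_nil,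
            Bool.false_eq_true, if_false]
          rw [ihm]
          simp [List.append_assoc]
        · -- header / hunk / context: same shape on both sides
          rw [pvLoopA]
          simp only [List.foldl_cons, pvStepB, hd, ha, Bool.false_eq_true, if_false,
            pvFlush_empty]
          rw [ihm]
          by_cases hh : (pvTyp dl == "header" || pvTyp dl == "hunk") = true
          · simp only [hh, if_true]; simp [List.append_assoc]
          · simp only [hh, hd, ha, Bool.false_eq_true, if_false]; simp [List.append_assoc]
    · -- dels pending, adds empty
      intro l r d hdne
      by_cases hd : (pvTyp dl == "del") = true
      · simp only [List.foldl_cons, pvStepB, hd, if_true, List.isEmpty_nil]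
        rw [ihd l r (d ++ [dl]) (by simp)]
        simp only [pvTake, hd, if_true]
        simp [List.append_assoc]
      · by_cases ha : (pvTyp dl == "add") = true
        · have hde : d.isEmpty = false := by
            cases d with | nil => exact absurd rfl hdne | cons _ _ => rfl
          simp only [List.foldl_cons, pvStepB, hd, ha, if_true, Bool.false_eq_true,
            if_false, hde, List.nil_append]
          rw [iha l r d [dl] hdne (by simp)]
          simp only [pvTake, hd, ha, if_true, Bool.false_eq_true, if_false]
          simp [List.append_assoc]
        · simp only [List.foldl_cons, pvStepB, hd, ha, Bool.false_eq_true, if_false,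
            pvFlush_state]
          rw [ihm]
          simp only [Bool.not_eq_true] at hd ha
          simp only [pvTake, hd, ha, Bool.false_eq_true, if_false]
          rw [pvLoopA]
          by_cases hh : (pvTyp dl == "header" || pvTyp dl == "hunk") = true
          · simp only [hh, if_true]; simp [List.append_assoc]
          · simp only [hh, hd, ha, Bool.false_eq_true, if_false]; simp [List.append_assoc]
    · -- dels and adds pending
      intro l r d a hdne hane
      by_cases hd : (pvTyp dl == "del") = true
      · have hae : a.isEmpty = false := by
          cases a with | nil => exact absurd rfl hane | cons _ _ => rfl
        have hnh : (pvTyp dl == "header" || pvTyp dl == "hunk") = false := by simp_all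
        simp only [List.foldl_cons, pvStepB, hd, if_true, hae, Bool.false_eq_true,
          if_false, pvFlush_state, List.nil_append]
        rw [ihd _ _ [dl] (by simp)]
        have hna : (pvTyp dl == "add") = false := by simp_all
        simp only [pvTake, hna, Bool.false_eq_true, if_false]
        rw [pvLoopA]
        simp only [hd, hnh, Bool.false_eq_true, if_false, if_true]
        simp [List.append_assoc]
      · by_cases ha : (pvTyp dl == "add") = true
        · have hde : d.isEmpty = false := by
            cases d with | nil => exact absurd rfl hdne | cons _ _ => rfl
          simp only [List.foldl_cons, pvStepB, hd, ha, if_true, Bool.false_eq_true,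
            if_false, hde, List.nil_append]
          rw [iha l r d (a ++ [dl]) hdne (by simp)]
          simp only [pvTake, hd, ha, if_true, Bool.false_eq_true, if_false]
          simp [List.append_assoc]
        · simp only [List.foldl_cons, pvStepB, hd, ha, Bool.false_eq_true, if_false,
            pvFlush_state]
          rw [ihm]
          simp only [Bool.not_eq_true] at hd ha
          simp only [pvTake, ha, Bool.false_eq_true, if_false]
          rw [pvLoopA]
          by_cases hh : (pvTyp dl == "header" || pvTyp dl == "hunk") = true
          · simp only [hh, if_true]; simp [List.append_assoc]
          · simp only [hh, hd, ha, Bool.false_eq_true, if_false]; simp [List.append_assoc]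

-- ===== VERDICT (by name: the statement is the Claim_ definition above) =====
theorem compute_split_lines_py_spec : Claim_equal_compute_split_lines_py := by
  intro diff_lines _ _
  unfold Spec_compute_split_lines_py compute_split_lines_py compute_split_lines_py_alt
  have h := (pv_main diff_lines).1 [] []
  simp only [pvFinish, List.nil_append] at h
  exact h.symm
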